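-- pv_equiv track=rewrite | github.com/sdrdray/samsung-ennovatex-traffic-detection | scripts/prepare_dataset.py | group_packets_by_time_window
-- ===== SOURCE A (Python) =====
-- from typing import List, Dict, Any
--
-- def group_packets_by_time_window(packets: List[Dict], window_size: int = 3) -> List[List[Dict]]:
--     """Group packets into time windows."""
--     if not packets:
--         return []
--
--     # Sort packets by timestamp
--     sorted_packets = sorted(packets, key=lambda x: x.get('timestamp', 0))
--
--     windows = []
--     current_window = []
--     window_start_time = sorted_packets[0].get('timestamp', 0)
--
--     for packet in sorted_packets:
--         packet_time = packet.get('timestamp', 0)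
--
--         # If packet is within current window
--         if packet_time - window_start_time <= window_size:
--             current_window.append(packet)
--         else:
--             # Start new window
--             if current_window:
--                 windows.append(current_window)
--             current_window = [packet]
--             window_start_time = packet_time
--
--     # Add the last window
--     if current_window:
--         windows.append(current_window)
--
--     return windows
-- ===== SOURCE B (Python) =====
-- def group_packets_by_time_window(packets, window_size=3):
--     """Group packets into time windows: chunk the sorted list into maximal runs."""
--     sorted_packets = sorted(packets, key=lambda x: x.get('timestamp', 0))
--     windows = []
--     rest = sorted_packets
--     while rest:
--         start = rest[0].get('timestamp', 0)
--         run = [rest[0]]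
--         i = 1
--         while i < len(rest) and rest[i].get('timestamp', 0) - start <= window_size:
--             run.append(rest[i])
--             i += 1
--         windows.append(run)
--         rest = rest[i:]
--     return windows
-- ===== Notes on version B (the rewrite author's own statement) =====
-- stated objective: alternative
-- what changed: A accumulates a mutable current-window list plus a running window-start inside one stateful fold; B instead chunks the sorted list by repeatedly splitting off the maximal run whose timestamps lie within window_size of the run's first element (take-run / drop-run recursion), with no window/start state threaded through.
import Mathlib
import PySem

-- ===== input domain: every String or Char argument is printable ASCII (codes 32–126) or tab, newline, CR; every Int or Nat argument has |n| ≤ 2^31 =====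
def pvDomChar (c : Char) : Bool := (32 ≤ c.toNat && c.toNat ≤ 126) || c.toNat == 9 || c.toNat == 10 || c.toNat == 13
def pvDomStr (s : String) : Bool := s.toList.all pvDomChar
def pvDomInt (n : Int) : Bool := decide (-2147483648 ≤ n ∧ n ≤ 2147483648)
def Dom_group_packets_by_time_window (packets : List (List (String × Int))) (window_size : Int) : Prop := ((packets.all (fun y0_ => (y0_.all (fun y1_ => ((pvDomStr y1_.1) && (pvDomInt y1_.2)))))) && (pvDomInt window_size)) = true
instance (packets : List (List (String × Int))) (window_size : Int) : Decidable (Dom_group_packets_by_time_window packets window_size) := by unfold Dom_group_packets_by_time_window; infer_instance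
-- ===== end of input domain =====

-- B replaces A's stateful current-window/window-start fold by a maximal-run chunking recursion on the sorted list (objective: alternative decomposition, same cost).

-- shared helper: packet.get('timestamp', 0)
def pvTs (p : List (String × Int)) : Int := PySem.Dict.getD ⟨p⟩ "timestamp" 0

-- ===== PORT A =====
-- loop body of A's for-loop, state = (windows, current_window, window_start_time)
def pvStepA (ws : Int)
    (st : List (List (List (String × Int))) × List (List (String × Int)) × Int)
    (packet : List (String × Int)) :
    List (List (List (String × Int))) × List (List (String × Int)) × Int :=
  let t := pvTs packet
  if t - st.2.2 ≤ ws then (st.1, st.2.1 ++ [packet], st.2.2)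
  else ((if st.2.1.isEmpty then st.1 else st.1 ++ [st.2.1]), [packet], t)

def group_packets_by_time_window (packets : List (List (String × Int))) (window_size : Int) : List (List (List (String × Int))) :=
  if packets.isEmpty then []
  else
    let sorted_packets := PySem.List.sorted packets (fun x => pvTs x) false
    let st := sorted_packets.foldl (pvStepA window_size) ([], [], pvTs (sorted_packets.headD []))
    if st.2.1.isEmpty then st.1 else st.1 ++ [st.2.1]

-- ===== PORT B =====
-- B's outer while loop: split off the maximal run within window_size of the run's head, recurse on the rest
def pvChunk (ws : Int) : List (List (String × Int)) → List (List (List (String × Int)))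
  | [] => []
  | p :: tl =>
    (p :: tl.takeWhile (fun q => decide (pvTs q - pvTs p ≤ ws))) ::
      pvChunk ws (tl.dropWhile (fun q => decide (pvTs q - pvTs p ≤ ws)))
termination_by l => l.length
decreasing_by exact Nat.lt_succ_of_le (List.length_dropWhile_le _ _)

def group_packets_by_time_window_alt (packets : List (List (String × Int))) (window_size : Int) : List (List (List (String × Int))) :=
  pvChunk window_size (PySem.List.sorted packets (fun x => pvTs x) false)

-- ===== PRECONDITION & SPEC =====
def Spec_group_packets_by_time_window (packets : List (List (String × Int))) (window_size : Int) (out : List (List (List (String × Int)))) : Prop := out = group_packets_by_time_window_alt packets window_size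
instance (packets : List (List (String × Int))) (window_size : Int) (out : List (List (List (String × Int)))) : Decidable (Spec_group_packets_by_time_window packets window_size out) := by unfold Spec_group_packets_by_time_window; infer_instance

-- ===== CLAIM (what is proved, stated in full; the proofs are below) =====
def Claim_equal_group_packets_by_time_window : Prop := ∀ (packets : List (List (String × Int))) (window_size : Int), Dom_group_packets_by_time_window packets window_size → Spec_group_packets_by_time_window packets window_size (group_packets_by_time_window packets window_size)

-- ===== LEMMAS AND PROOFS =====

-- A's fold, started with a nonempty current window, produces exactly that window extended by the
-- maximal run still within `start`, followed by B's chunking of the remainder.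
theorem pv_loop_eq (ws : Int) :
    ∀ (l : List (List (String × Int))) (acc : List (List (List (String × Int))))
      (cur : List (List (String × Int))) (start : Int), cur ≠ [] →
      (let st := l.foldl (pvStepA ws) (acc, cur, start)
       if st.2.1.isEmpty then st.1 else st.1 ++ [st.2.1]) =
      acc ++ [cur ++ l.takeWhile (fun q => decide (pvTs q - start ≤ ws))] ++
        pvChunk ws (l.dropWhile (fun q => decide (pvTs q - start ≤ ws))) := by
  intro l
  induction l with
  | nil =>
    intro acc cur start hcur
    simp [pvChunk, List.isEmpty_iff, hcur]
  | cons q tl ih =>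
    intro acc cur start hcur
    by_cases h : pvTs q - start ≤ ws
    · have : pvStepA ws (acc, cur, start) q = (acc, cur ++ [q], start) := by
        simp [pvStepA, h]
      have hd : (decide (pvTs q - start ≤ ws)) = true := decide_eq_true h
      simp only [List.foldl_cons, this]
      rw [ih acc (cur ++ [q]) start (by simp)]
      simp only [List.takeWhile_cons, List.dropWhile_cons, hd, if_true]
      simp
    · have : pvStepA ws (acc, cur, start) q = (acc ++ [cur], [q], pvTs q) := by
        simp [pvStepA, h, List.isEmpty_iff, hcur]
      have hd : (decide (pvTs q - start ≤ ws)) = false := decide_eq_false h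
      simp only [List.foldl_cons, this]
      rw [ih (acc ++ [cur]) [q] (pvTs q) (by simp)]
      simp only [List.takeWhile_cons, List.dropWhile_cons, hd, Bool.false_eq_true, if_false]
      rw [pvChunk]
      simp

-- ===== VERDICT (by name: the statement is the Claim_ definition above) =====
theorem group_packets_by_time_window_spec : Claim_equal_group_packets_by_time_window := by
  intro packets ws _
  unfold Spec_group_packets_by_time_window group_packets_by_time_window group_packets_by_time_window_alt
  by_cases hp : packets.isEmpty
  · have : packets = [] := List.isEmpty_iff.mp hp
    subst this
    simp [PySem.List.sorted, pvChunk]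
  · simp only [hp, Bool.false_eq_true, if_false]
    have hsp : PySem.List.sorted packets (fun x => pvTs x) false ≠ [] := by
      rw [Ne, PySem.List.sorted_eq_nil_iff]
      exact fun h => hp (h ▸ rfl)
    obtain ⟨h, t, hht⟩ := List.exists_cons_of_ne_nil hsp
    rw [hht]
    have hstep : pvStepA ws ([], [], pvTs ((h :: t).headD [])) h = ([], [h], pvTs h) := by
      simp only [pvStepA]
      split <;> simp
    simp only [List.foldl_cons, hstep]
    rw [pv_loop_eq ws t [] [h] (pvTs h) (by simp)]
    simp [pvChunk]
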